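-- pv_equiv track=rewrite | github.com/Perthanakrit/Python2 | KU_CodingLab/Lab14_Review/pro2.py | f_name
-- ===== SOURCE A (Python) =====
-- def f_name(name, vowels):
--     txt = ""
--     found_vowel = 0
--
--     for i in range(len(name)):
--         if name[i] in vowels:
--             found_vowel += 1
--             if (found_vowel == 2):
--                 return txt
--         txt += name[i]
--
--     return name
-- ===== SOURCE B (Python) =====
-- def f_name(name, vowels):
--     positions = [i for i, c in enumerate(name) if c in vowels]
--     if len(positions) >= 2:
--         return name[:positions[1]]
--     return name
-- ===== Notes on version B (the rewrite author's own statement) =====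
-- stated objective: alternative
-- what changed: Replaced the interleaved count-and-accumulate loop with early return by a two-phase shape: collect all vowel indices with one enumerate-comprehension, then return a single slice up to the second index (or the whole name).
import Mathlib
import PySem

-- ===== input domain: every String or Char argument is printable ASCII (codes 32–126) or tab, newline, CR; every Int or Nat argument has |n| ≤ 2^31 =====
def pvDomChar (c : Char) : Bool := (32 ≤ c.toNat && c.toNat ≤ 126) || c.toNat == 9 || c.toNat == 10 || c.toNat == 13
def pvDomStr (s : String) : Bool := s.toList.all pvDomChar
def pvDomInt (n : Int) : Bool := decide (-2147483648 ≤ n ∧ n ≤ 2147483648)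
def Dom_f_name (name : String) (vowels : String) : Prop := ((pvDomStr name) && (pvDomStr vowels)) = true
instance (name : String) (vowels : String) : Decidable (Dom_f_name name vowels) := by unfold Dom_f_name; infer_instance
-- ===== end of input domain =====

-- B replaces A's count-and-accumulate loop (with early return) by a two-phase
-- shape: collect all vowel indices first, then take one slice; same cost.

-- ===== PORT A =====
-- A's loop: accumulate txt, count vowels, return txt at the second vowel.
def f_name_loopA (name : String) (v : List Char) : List Char → List Char → Nat → String
  | [], _, _ => name
  | c :: rest, txt, found =>
    if c ∈ v then
      if found + 1 = 2 then String.ofList txt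
      else f_name_loopA name v rest (txt ++ [c]) (found + 1)
    else f_name_loopA name v rest (txt ++ [c]) found

def f_name (name : String) (vowels : String) : String :=
  f_name_loopA name vowels.toList name.toList [] 0

-- ===== PORT B =====
-- positions = [i for i, c in enumerate(name) if c in vowels];
-- if len(positions) >= 2: return name[:positions[1]]; else return name.
def f_name_alt (name : String) (vowels : String) : String :=
  let positions : List Int :=
    ((PySem.List.enumerate name.toList 0).filter (fun p => p.2 ∈ vowels.toList)).map Prod.fst
  if 2 ≤ positions.length then
    String.ofList (PySem.List.slice name.toList none (PySem.List.pyGet? positions 1))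
  else name

-- ===== PRECONDITION & SPEC =====
def Spec_f_name (name : String) (vowels : String) (out : String) : Prop := out = f_name_alt name vowels
instance (name : String) (vowels : String) (out : String) : Decidable (Spec_f_name name vowels out) := by unfold Spec_f_name; infer_instance

-- ===== CLAIM (what is proved, stated in full; the proofs are below) =====
def Claim_equal_f_name : Prop := ∀ (name : String) (vowels : String), Dom_f_name name vowels → Spec_f_name name vowels (f_name name vowels)

-- ===== LEMMAS AND PROOFS =====

-- vowel positions of l, enumerated from s
def posFrom (v : List Char) (s : Int) (l : List Char) : List Int :=
  ((PySem.List.enumerate l s).filter (fun p => p.2 ∈ v)).map Prod.fst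

theorem posFrom_nil (v : List Char) (s : Int) : posFrom v s [] = [] := by
  simp [posFrom, PySem.List.enumerate_nil]

theorem posFrom_cons (v : List Char) (s : Int) (c : Char) (l : List Char) :
    posFrom v s (c :: l) =
      if c ∈ v then s :: posFrom v (s + 1) l else posFrom v (s + 1) l := by
  by_cases h : c ∈ v <;>
    simp [posFrom, PySem.List.enumerate_cons, h]

-- what B returns, phrased over take
def res2 (name : String) : List Int → String
  | _ :: p :: _ => String.ofList (name.toList.take p.toNat)
  | _ => name

theorem loopA_one (name : String) (v : List Char) :
    ∀ (l txt : List Char) (s : Nat), name.toList = txt ++ l → s = txt.length →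
      f_name_loopA name v l txt 1 =
        (match posFrom v (s : Int) l with
          | p :: _ => String.ofList (name.toList.take p.toNat)
          | [] => name) := by
  intro l
  induction l with
  | nil => intro txt s _ _; simp [f_name_loopA, posFrom_nil]
  | cons c rest ih =>
    intro txt s hname hs
    rw [posFrom_cons]
    by_cases h : c ∈ v
    · simp only [f_name_loopA, if_pos h]
      have : name.toList.take s = txt := by
        rw [hname, hs]; simp
      simp [this]
    · simp only [f_name_loopA, if_neg h]
      have h1 : name.toList = (txt ++ [c]) ++ rest := by simp [hname]
      have h2 : s + 1 = (txt ++ [c]).length := by simp [hs]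
      have := ih (txt ++ [c]) (s + 1) h1 h2
      rw [this]
      norm_num

theorem loopA_zero (name : String) (v : List Char) :
    ∀ (l txt : List Char) (s : Nat), name.toList = txt ++ l → s = txt.length →
      f_name_loopA name v l txt 0 = res2 name (posFrom v (s : Int) l) := by
  intro l
  induction l with
  | nil => intro txt s _ _; simp [f_name_loopA, posFrom_nil, res2]
  | cons c rest ih =>
    intro txt s hname hs
    rw [posFrom_cons]
    by_cases h : c ∈ v
    · simp only [f_name_loopA, if_pos h]
      have h1 : name.toList = (txt ++ [c]) ++ rest := by simp [hname]
      have h2 : s + 1 = (txt ++ [c]).length := by simp [hs]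
      have hone := loopA_one name v rest (txt ++ [c]) (s + 1) h1 h2
      norm_num
      rw [hone]
      cases hp : posFrom v ((s : Int) + 1) rest with
      | nil => push_cast; rw [hp]; simp [res2]
      | cons p tl => push_cast; rw [hp]; simp [res2]
    · simp only [f_name_loopA, if_neg h]
      have h1 : name.toList = (txt ++ [c]) ++ rest := by simp [hname]
      have h2 : s + 1 = (txt ++ [c]).length := by simp [hs]
      have := ih (txt ++ [c]) (s + 1) h1 h2
      rw [this]; push_cast; simp

-- every position enumerated from a natural start is that start plus an offset
theorem posFrom_nonneg (v : List Char) (s : Int) (hs : 0 ≤ s) (l : List Char) :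
    ∀ p ∈ posFrom v s l, 0 ≤ p := by
  induction l generalizing s hs with
  | nil => simp [posFrom_nil]
  | cons c rest ih =>
    intro p hp
    rw [posFrom_cons] at hp
    have ih' := ih (s + 1) (by omega)
    by_cases h : c ∈ v
    · rw [if_pos h] at hp
      rcases List.mem_cons.mp hp with rfl | hmem
      · exact hs
      · exact ih' p hmem
    · rw [if_neg h] at hp
      exact ih' p hp

theorem f_name_alt_eq_res2 (name : String) (vowels : String) :
    f_name_alt name vowels = res2 name (posFrom vowels.toList 0 name.toList) := by
  unfold f_name_alt
  have h0 : ((PySem.List.enumerate name.toList 0).filter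
      (fun p => p.2 ∈ vowels.toList)).map Prod.fst
      = posFrom vowels.toList (0 : Int) name.toList := rfl
  simp only [h0]
  cases hp : posFrom vowels.toList (0 : Int) name.toList with
  | nil => simp [res2]
  | cons a tl =>
    cases tl with
    | nil => simp [res2]
    | cons p tl' =>
      have hnn : 0 ≤ p := by
        have := posFrom_nonneg vowels.toList 0 le_rfl name.toList p
        rw [hp] at this
        exact this (by simp)
      have hget : PySem.List.pyGet? (a :: p :: tl') (1 : Int) = some p := by
        simp [PySem.List.pyGet?, PySem.List.pyIdx?]
      simp only [hget, List.length_cons]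
      rw [if_pos (by omega), PySem.List.slice_to _ hnn]
      simp [res2]

-- ===== VERDICT (by name: the statement is the Claim_ definition above) =====
theorem f_name_spec : Claim_equal_f_name := by
  intro name vowels _
  unfold Spec_f_name f_name
  rw [f_name_alt_eq_res2]
  have := loopA_zero name vowels.toList name.toList [] 0 (by simp) (by simp)
  simpa using this
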